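-- pv_equiv track=rewrite | github.com/oUesio/TTP | loader.py | build_candidate_lists
-- ===== SOURCE A (Python) =====
-- def build_candidate_lists(coords, k):
--     """
--     For each city, return its k nearest neighbours.
--     Used to restrict 2-opt neighbourhood.
--     """
--     n = len(coords)
--     cand = [[] for _ in range(n)]
--     # compute full distance matrix row by row
--     for i in range(n):
--         drow = []
--         xi, yi = coords[i]
--         for j in range(n):
--             if i == j:
--                 continue
--             dx = xi - coords[j][0]
--             dy = yi - coords[j][1]
--             d = dx*dx + dy*dy  # square dist is enough for sorting
--             drow.append((d, j))
--         drow.sort(key=lambda x: x[0])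
--         cand[i] = [j for _, j in drow[:k]]
--     return cand
-- ===== SOURCE B (Python) =====
-- def build_candidate_lists(coords, k):
--     """
--     For each city, return its k nearest neighbours (by squared distance,
--     ties by index).  Bounded-insertion selection: keep only the current k
--     best per city instead of sorting the whole distance row.
--     """
--     n = len(coords)
--     if k <= 0:
--         return [[] for _ in range(n)]
--     out = []
--     for i in range(n):
--         xi, yi = coords[i]
--         best = []  # at most k (dist, index) pairs, ascending
--         for j in range(n):
--             if j == i:
--                 continue
--             dx = xi - coords[j][0]
--             dy = yi - coords[j][1]
--             d = dx * dx + dy * dy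
--             if len(best) == k and best[-1][0] <= d:
--                 continue  # cannot enter the top k
--             p = 0
--             while p < len(best) and best[p][0] <= d:
--                 p += 1
--             best.insert(p, (d, j))
--             if len(best) > k:
--                 best.pop()
--         out.append([j for _, j in best])
--     return out
-- ===== Notes on version B (the rewrite author's own statement) =====
-- stated objective: alternative
-- what changed: Per city, B maintains a bounded insertion buffer of only the current k best (dist, index) pairs (with an early skip when a distance cannot enter the top k) instead of materialising and fully sorting the whole distance row; B returns empty neighbour lists for non-positive k.
-- intended difference: For negative k with 1-len(coords) < k < 0, A's slice drow[:k] wraps around and returns all but the |k| farthest neighbours per city, while B returns empty lists, the intended 'no candidates requested' answer for a non-positive neighbour count. — e.g. on build_candidate_lists([(0, 0), (0, 1), (0, 3)], -1): A returns [[1], [0], [1]], B returns [[], [], []]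
import Mathlib
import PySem

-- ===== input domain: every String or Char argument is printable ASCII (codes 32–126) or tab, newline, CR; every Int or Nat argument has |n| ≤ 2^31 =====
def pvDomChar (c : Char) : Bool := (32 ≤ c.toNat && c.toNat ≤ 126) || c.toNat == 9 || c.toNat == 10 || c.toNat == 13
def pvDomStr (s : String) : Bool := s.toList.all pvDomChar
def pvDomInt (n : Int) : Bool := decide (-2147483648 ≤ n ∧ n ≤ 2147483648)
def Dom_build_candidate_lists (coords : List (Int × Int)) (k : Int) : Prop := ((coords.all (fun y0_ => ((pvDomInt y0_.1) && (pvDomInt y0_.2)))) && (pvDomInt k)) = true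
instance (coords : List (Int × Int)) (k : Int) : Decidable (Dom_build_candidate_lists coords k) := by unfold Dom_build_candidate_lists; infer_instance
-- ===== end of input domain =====

-- B keeps a bounded top-k insertion buffer per city instead of fully sorting each distance row;
-- for negative k, B returns empty rows where A's negative slice keeps all but the |k| farthest (see D_ below).

-- ===== PORT A =====
def build_candidate_lists (coords : List (Int × Int)) (k : Int) : List (List Int) :=
  let n : Int := coords.length
  let cand0 : List (List Int) := (PySem.List.pyRange 0 n 1).map (fun _ => ([] : List Int))
  (PySem.List.pyRange 0 n 1).foldl (fun cand i =>
    let xy := PySem.List.pyGetD coords i (0, 0)     -- coords[i], in range on every loop iteration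
    let drow : List (Int × Int) := (PySem.List.pyRange 0 n 1).foldl (fun dr j =>
      if i = j then dr
      else
        let cj := PySem.List.pyGetD coords j (0, 0) -- coords[j], in range
        let dx := xy.1 - cj.1
        let dy := xy.2 - cj.2
        dr ++ [(dx * dx + dy * dy, j)]) []
    let srow := PySem.List.sorted drow (fun p => p.1) false
    PySem.List.pySetD cand i ((PySem.List.slice srow none (some k)).map (fun p => p.2))) cand0

-- ===== PORT B =====
-- B's inner "p = 0; while best[p][0] <= d: p += 1; best.insert(p, (d, j))" — the scan-and-insert
-- written as one recursion: insert (d, j) before the first entry with a strictly larger distance.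
def bclInsert (d : Int) (j : Int) : List (Int × Int) → List (Int × Int)
  | [] => [(d, j)]
  | y :: t => if y.1 ≤ d then y :: bclInsert d j t else (d, j) :: y :: t

-- one iteration of B's inner loop body once the distance d to city j is known
def bclStep (k : Int) (best : List (Int × Int)) (d : Int) (j : Int) : List (Int × Int) :=
  if (best.length : Int) = k ∧ (best.getLastD (0, 0)).1 ≤ d then best  -- best[-1], guarded by len == k ≥ 1
  else
    let nb := bclInsert d j best
    if (nb.length : Int) > k then nb.dropLast else nb  -- best.pop()

def build_candidate_lists_alt (coords : List (Int × Int)) (k : Int) : List (List Int) :=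
  let n : Int := coords.length
  if k ≤ 0 then (PySem.List.pyRange 0 n 1).map (fun _ => ([] : List Int))
  else
    (PySem.List.pyRange 0 n 1).foldl (fun out i =>
      let xy := PySem.List.pyGetD coords i (0, 0)
      let best := (PySem.List.pyRange 0 n 1).foldl (fun best j =>
        if j = i then best
        else
          let cj := PySem.List.pyGetD coords j (0, 0)
          let dx := xy.1 - cj.1
          let dy := xy.2 - cj.2
          bclStep k best (dx * dx + dy * dy) j) []
      out ++ [best.map (fun p => p.2)]) []

-- ===== PRECONDITION & SPEC =====
-- For negative k with 1 - len(coords) < k < 0, A's slice drow[:k] wraps around and returns all but the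
-- |k| farthest neighbours per city, while B returns empty lists — the intended answer for k ≤ 0 neighbours.
def D_build_candidate_lists (coords : List (Int × Int)) (k : Int) : Prop :=
  k < 0 ∧ 1 - (coords.length : Int) < k
instance (coords : List (Int × Int)) (k : Int) : Decidable (D_build_candidate_lists coords k) := by
  unfold D_build_candidate_lists; infer_instance

def Spec_build_candidate_lists (coords : List (Int × Int)) (k : Int) (out : List (List Int)) : Prop :=
  ¬ D_build_candidate_lists coords k → out = build_candidate_lists_alt coords k
instance (coords : List (Int × Int)) (k : Int) (out : List (List Int)) : Decidable (Spec_build_candidate_lists coords k out) := by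
  unfold Spec_build_candidate_lists; infer_instance

def pvDiffWitness_build_candidate_lists : (List (Int × Int)) × Int := ([(0, 0), (0, 1), (0, 3)], -1)
def pvDiffWitnessOut_build_candidate_lists : (List (List Int)) × (List (List Int)) :=
  ([[1], [0], [1]], [[], [], []])

-- ===== CLAIM (what is proved, stated in full; the proofs are below) =====
def Claim_unchanged_build_candidate_lists : Prop := ∀ (coords : List (Int × Int)) (k : Int), Dom_build_candidate_lists coords k → Spec_build_candidate_lists coords k (build_candidate_lists coords k)
def Claim_changed_build_candidate_lists : Prop := Dom_build_candidate_lists (pvDiffWitness_build_candidate_lists.1) (pvDiffWitness_build_candidate_lists.2) ∧ D_build_candidate_lists (pvDiffWitness_build_candidate_lists.1) (pvDiffWitness_build_candidate_lists.2) ∧ build_candidate_lists (pvDiffWitness_build_candidate_lists.1) (pvDiffWitness_build_candidate_lists.2) = pvDiffWitnessOut_build_candidate_lists.1 ∧ build_candidate_lists_alt (pvDiffWitness_build_candidate_lists.1) (pvDiffWitness_build_candidate_lists.2) = pvDiffWitnessOut_build_candidate_lists.2 ∧ pvDiffWitnessOut_build_candidate_lists.1 ≠ pvDiffWitnessOut_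build_candidate_lists.2
def Claim_exact_build_candidate_lists : Prop := ∀ (coords : List (Int × Int)) (k : Int), Dom_build_candidate_lists coords k → D_build_candidate_lists coords k → build_candidate_lists coords k ≠ build_candidate_lists_alt coords k

-- ===== LEMMAS AND PROOFS =====

-- B's insert is PySem's stable insertion (proof-side bridge)
def bclIns (x : Int × Int) (s : List (Int × Int)) : List (Int × Int) :=
  PySem.List.insertBy (fun a b => decide (a.1 < b.1)) x s

theorem bclInsert_eq (d j : Int) (s : List (Int × Int)) :
    bclInsert d j s = bclIns (d, j) s := by
  induction s with
  | nil => rfl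
  | cons y t ih =>
      simp only [bclInsert, bclIns, PySem.List.insertBy]
      by_cases h : y.1 ≤ d
      · simp [h, not_lt.2 h, ih, bclIns]
      · simp [h, lt_of_not_ge h]

theorem bclIns_length (x : Int × Int) (s : List (Int × Int)) :
    (bclIns x s).length = s.length + 1 := by
  induction s with
  | nil => rfl
  | cons y t ih =>
      simp only [bclIns, PySem.List.insertBy]
      split <;> simp_all [bclIns]

theorem take_bclIns_congr (x : Int × Int) :
    ∀ (kk : Nat) (s t : List (Int × Int)), List.take kk s = List.take kk t →
      List.take kk (bclIns x s) = List.take kk (bclIns x t) := by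
  intro kk
  induction kk with
  | zero => simp
  | succ m ih =>
      intro s t h
      cases s with
      | nil =>
          cases t with
          | nil => rfl
          | cons y t' => simp at h
      | cons y s' =>
          cases t with
          | nil => simp at h
          | cons z t' =>
              simp only [List.take_succ_cons, List.cons.injEq] at h
              obtain ⟨rfl, h2⟩ := h
              simp only [bclIns, PySem.List.insertBy]
              split
              · simp only [List.take_succ_cons, List.cons.injEq, true_and]
                cases m with
                | zero => simp
                | succ m' =>
                    simp only [List.take_succ_cons, List.cons.injEq, true_and]
                    calc List.take m' s' = List.take m' (List.take (m' + 1) s') := by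
                          rw [List.take_take]; simp
                      _ = List.take m' (List.take (m' + 1) t') := by rw [h2]
                      _ = List.take m' t' := by rw [List.take_take]; simp
              · simp only [List.take_succ_cons, List.cons.injEq, true_and]
                exact ih s' t' h2

theorem take_bclIns_take (x : Int × Int) (kk : Nat) (s : List (Int × Int)) :
    List.take kk (bclIns x (List.take kk s)) = List.take kk (bclIns x s) := by
  apply take_bclIns_congr
  rw [List.take_take]; simp

theorem le_getLastD_of_pairwise :
    ∀ (l : List (Int × Int)), List.Pairwise (fun a b => a.1 ≤ b.1) l →
      ∀ y ∈ l, y.1 ≤ (l.getLastD (0, 0)).1 := by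
  intro l
  induction l with
  | nil => simp
  | cons a t ih =>
      intro hp y hy
      rw [List.pairwise_cons] at hp
      rw [List.getLastD_cons]
      cases t with
      | nil => simp at hy ⊢; simp [hy]
      | cons b t' =>
          rcases List.mem_cons.1 hy with rfl | hyt
          · exact le_trans (hp.1 b (List.mem_cons_self)) (ih hp.2 b List.mem_cons_self)
          · exact ih hp.2 y hyt

-- one B step on the truncated buffer = truncation of the stable insert into the full sorted row
theorem bclStep_eq (kk : Nat) (s : List (Int × Int)) (d j : Int)
    (hp : List.Pairwise (fun a b : Int × Int => a.1 ≤ b.1) s) :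
    bclStep (kk : Int) (List.take kk s) d j = List.take kk (bclIns (d, j) s) := by
  rw [← take_bclIns_take]
  set t := List.take kk s with ht
  have htp : List.Pairwise (fun a b : Int × Int => a.1 ≤ b.1) t :=
    hp.sublist (List.take_sublist kk s)
  have htlen : t.length ≤ kk := by simp [ht]
  unfold bclStep
  split
  · rename_i hg
    have hlen : t.length = kk := by exact_mod_cast hg.1
    have hall : ∀ y ∈ t, (decide ((d, j).1 < y.1) : Bool) = false := by
      intro y hy
      have := le_trans (le_getLastD_of_pairwise t htp y hy) hg.2
      simpa using not_lt.2 this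
    rw [show bclIns (d, j) t = t ++ [(d, j)] from
      PySem.List.insertBy_of_forall_not_before _ _ _ hall]
    rw [List.take_append_of_le_length (by omega)]
    simp [hlen]
  · rw [← bclInsert_eq]
    have hnb : (bclInsert d j t).length = t.length + 1 := by
      rw [bclInsert_eq]; exact bclIns_length _ _
    by_cases hlong : ((bclInsert d j t).length : Int) > (kk : Int)
    · simp only [hlong, if_pos]
      have hl1 : (bclInsert d j t).length = kk + 1 := by omega
      rw [List.dropLast_eq_take, hl1]
      simp
    · simp only [hlong, if_false]
      rw [List.take_of_length_le (by omega)]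

-- B's inner loop over any index list = take kk of the sorted row A builds over the same list
theorem row_eq (f : Int → Int) (i : Int) (kk : Nat) :
    ∀ (l : List Int) (acc : List (Int × Int)),
      l.foldl (fun best j => if j = i then best else bclStep (kk : Int) best (f j) j)
        (List.take kk (PySem.List.sorted acc (fun p => p.1) false))
      = List.take kk (PySem.List.sorted
          (l.foldl (fun dr j => if i = j then dr else dr ++ [(f j, j)]) acc)
          (fun p => p.1) false) := by
  intro l
  induction l with
  | nil => intro acc; rfl
  | cons j l ih =>
      intro acc
      by_cases h : j = i
      · simp only [List.foldl_cons, h, if_pos]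
        simpa [h] using ih acc
      · have h' : ¬ i = j := fun e => h e.symm
        simp only [List.foldl_cons, h, h', if_false]
        have hstep : bclStep (kk : Int)
            (List.take kk (PySem.List.sorted acc (fun p => p.1) false)) (f j) j
            = List.take kk (PySem.List.sorted (acc ++ [(f j, j)]) (fun p => p.1) false) := by
          rw [bclStep_eq kk _ (f j) j (PySem.List.sorted_pairwise acc (fun p => p.1))]
          congr 1
          rw [PySem.List.sorted_eq_foldl_insertBy, PySem.List.sorted_eq_foldl_insertBy,
            List.foldl_append]
          rfl
        rw [hstep, ih]

-- A's outer loop: writing row i into slot i of a length-n list is a map over the range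
theorem foldl_set_range (g : Nat → List Int) :
    ∀ (n : Nat) (c : List (List Int)), n ≤ c.length →
      (List.range n).foldl (fun cand i => cand.set i (g i)) c
      = (List.range n).map g ++ c.drop n := by
  intro n
  induction n with
  | zero => simp
  | succ m ih =>
      intro c hc
      rw [List.range_succ, List.foldl_append, List.foldl_cons, List.foldl_nil,
        ih c (by omega)]
      have hmlen : ((List.range m).map g).length = m := by simp
      rw [List.set_append_right _ _ (by omega)]
      have hne : c.drop m ≠ [] := by
        simp [List.drop_eq_nil_iff]; omega
      cases hd : c.drop m with
      | nil => exact absurd hd hne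
      | cons a t =>
          have ht : t = c.drop (m + 1) := by
            have := congrArg List.tail hd
            simpa [List.tail_drop] using this.symm
          simp [ht]

-- named pieces of A, used to state the normal forms
def pvDist (coords : List (Int × Int)) (i j : Int) : Int :=
  let xy := PySem.List.pyGetD coords i (0, 0)
  let cj := PySem.List.pyGetD coords j (0, 0)
  (xy.1 - cj.1) * (xy.1 - cj.1) + (xy.2 - cj.2) * (xy.2 - cj.2)

def pvDrow (coords : List (Int × Int)) (i : Int) : List (Int × Int) :=
  (PySem.List.pyRange 0 (coords.length : Int) 1).foldl
    (fun dr j => if i = j then dr else dr ++ [(pvDist coords i j, j)]) []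

def pvRowA (coords : List (Int × Int)) (k i : Int) : List Int :=
  (PySem.List.slice (PySem.List.sorted (pvDrow coords i) (fun p => p.1) false)
    none (some k)).map (fun p => p.2)

theorem A_eq_map (coords : List (Int × Int)) (k : Int) :
    build_candidate_lists coords k
      = (List.range coords.length).map (fun i : Nat => pvRowA coords k (i : Int)) := by
  have hn : PySem.List.pyRange 0 (coords.length : Int) 1
      = (List.range coords.length).map (fun i : Nat => (i : Int)) :=
    PySem.List.pyRange_zero_nat _
  simp only [build_candidate_lists]
  conv_lhs => rw [hn, List.foldl_map]
  have hbody : (fun (cand : List (List Int)) (i : Nat) =>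
      PySem.List.pySetD cand (i : Int)
        ((PySem.List.slice
            (PySem.List.sorted
              (((List.range coords.length).map (fun i : Nat => (i : Int))).foldl (fun dr j =>
                if (i : Int) = j then dr
                else dr ++ [(((PySem.List.pyGetD coords (i : Int) (0, 0)).1 - (PySem.List.pyGetD coords j (0, 0)).1) *
                      ((PySem.List.pyGetD coords (i : Int) (0, 0)).1 - (PySem.List.pyGetD coords j (0, 0)).1) +
                      ((PySem.List.pyGetD coords (i : Int) (0, 0)).2 - (PySem.List.pyGetD coords j (0, 0)).2) *
                      ((PySem.List.pyGetD coords (i : Int) (0, 0)).2 - (PySem.List.pyGetD coords j (0, 0)).2), j)]) [])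
              (fun p => p.1) false)
            none (some k)).map (fun p => p.2)))
      = fun (cand : List (List Int)) (i : Nat) => cand.set i (pvRowA coords k (i : Int)) := by
    funext cand i
    simp only [PySem.List.pySetD_natCast, pvRowA, pvDrow, pvDist, hn]
  rw [hbody]
  rw [foldl_set_range (fun i : Nat => pvRowA coords k (i : Int)) coords.length _ (by simp)]
  simp

theorem B_eq_map_pos (coords : List (Int × Int)) (k : Int) (hk : 0 < k) :
    build_candidate_lists_alt coords k
      = (List.range coords.length).map (fun i : Nat =>
          (List.take k.toNat (PySem.List.sorted (pvDrow coords (i : Int)) (fun p => p.1) false)).map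
            (fun p => p.2)) := by
  have hn : PySem.List.pyRange 0 (coords.length : Int) 1
      = (List.range coords.length).map (fun i : Nat => (i : Int)) :=
    PySem.List.pyRange_zero_nat _
  have hkk : ((k.toNat : Nat) : Int) = k := Int.toNat_of_nonneg (by omega)
  simp only [build_candidate_lists_alt, if_neg (by omega : ¬ k ≤ 0)]
  rw [PySem.List.foldl_append_singleton_eq_map
    (fun i => ((PySem.List.pyRange 0 (coords.length : Int) 1).foldl (fun best j =>
        if j = i then best
        else bclStep k best
          (((PySem.List.pyGetD coords i (0, 0)).1 - (PySem.List.pyGetD coords j (0, 0)).1) *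
            ((PySem.List.pyGetD coords i (0, 0)).1 - (PySem.List.pyGetD coords j (0, 0)).1) +
            ((PySem.List.pyGetD coords i (0, 0)).2 - (PySem.List.pyGetD coords j (0, 0)).2) *
            ((PySem.List.pyGetD coords i (0, 0)).2 - (PySem.List.pyGetD coords j (0, 0)).2)) j) []).map
      (fun p => p.2)) _ _]
  rw [hn, List.map_map]
  apply List.map_congr_left
  intro i _
  have hrow := row_eq (pvDist coords (i : Int)) (i : Int) k.toNat
    (PySem.List.pyRange 0 (coords.length : Int) 1) []
  rw [show PySem.List.sorted ([] : List (Int × Int)) (fun p => p.1) false = [] from rfl,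
    List.take_nil] at hrow
  simp only [pvDist, hkk] at hrow
  simp only [Function.comp]
  congr 1
  simp only [pvDrow, pvDist]
  rw [← hrow, hn]

-- length of A's distance row: every index except i contributes one entry
theorem drow_length_aux (f : Int → Int) (i : Int) :
    ∀ (l : List Int) (acc : List (Int × Int)),
      (l.foldl (fun dr j => if i = j then dr else dr ++ [(f j, j)]) acc).length
        = acc.length + l.countP (fun j => decide ¬ i = j) := by
  intro l
  induction l with
  | nil => simp
  | cons j l ih =>
      intro acc
      by_cases h : i = j
      · subst h
        simp only [List.foldl_cons, if_pos, List.countP_cons]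
        rw [ih]
        simp
      · simp only [List.foldl_cons, if_neg h, List.countP_cons]
        rw [ih]
        simp [h]
        omega

theorem pvDrow_length (coords : List (Int × Int)) (i : Nat) (hi : i < coords.length) :
    (pvDrow coords (i : Int)).length = coords.length - 1 := by
  unfold pvDrow
  rw [drow_length_aux]
  have h1 : (PySem.List.pyRange 0 (coords.length : Int) 1).length = coords.length := by
    simp [PySem.List.length_pyRange_one]
  have h2 := List.length_eq_countP_add_countP (fun j : Int => decide ((i : Int) = j))
    (l := PySem.List.pyRange 0 (coords.length : Int) 1)
  have h3 : (PySem.List.pyRange 0 (coords.length : Int) 1).countP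
      (fun j : Int => decide ((i : Int) = j)) = 1 := by
    have hc : (PySem.List.pyRange 0 (coords.length : Int) 1).countP
        (fun j : Int => decide ((i : Int) = j))
        = (PySem.List.pyRange 0 (coords.length : Int) 1).count (i : Int) := by
      rw [List.count]
      apply List.countP_congr
      intro a _
      simp [eq_comm, BEq.beq]
    rw [hc]
    have hmem : (i : Int) ∈ PySem.List.pyRange 0 (coords.length : Int) 1 := by
      rw [PySem.List.mem_pyRange_one]; omega
    exact List.count_eq_one_of_mem (PySem.List.nodup_pyRange_one _ _) hmem
  have h4 : (PySem.List.pyRange 0 (coords.length : Int) 1).countP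
      (fun j : Int => decide ¬ (i : Int) = j)
      = coords.length - 1 := by
    have hthis := h2
    rw [h1, h3] at hthis
    have hcong : (PySem.List.pyRange 0 (coords.length : Int) 1).countP
        (fun a : Int => decide ¬ decide ((i : Int) = a) = true)
        = (PySem.List.pyRange 0 (coords.length : Int) 1).countP
        (fun j : Int => decide ¬ (i : Int) = j) := by
      apply List.countP_congr
      intro a _
      simp
    rw [hcong] at hthis
    omega
  simpa using h4

-- A's row is empty when k ≤ 1 - n (the slice collapses)
theorem pvRowA_neg_nil (coords : List (Int × Int)) (k : Int) (i : Nat)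
    (hi : i < coords.length) (hk : k < 0) (hkn : k ≤ 1 - (coords.length : Int)) :
    pvRowA coords k (i : Int) = [] := by
  unfold pvRowA
  set srow := PySem.List.sorted (pvDrow coords (i : Int)) (fun p => p.1) false with hs
  have hlen : srow.length = coords.length - 1 := by
    rw [hs, PySem.List.length_sorted, pvDrow_length coords i hi]
  have hm : k = -(((-k).toNat : Nat) : Int) := by omega
  rw [hm, PySem.List.slice_to_neg_natCast srow (-k).toNat (by omega)]
  have : srow.length - (-k).toNat = 0 := by omega
  rw [this]
  simp

theorem B_eq_map_nonpos (coords : List (Int × Int)) (k : Int) (hk : k ≤ 0) :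
    build_candidate_lists_alt coords k
      = (List.range coords.length).map (fun _ : Nat => ([] : List Int)) := by
  simp only [build_candidate_lists_alt, if_pos hk]
  rw [PySem.List.pyRange_zero_nat, List.map_map]
  rfl

-- ===== VERDICT (by name: the statement is the Claim_ definition above) =====
theorem build_candidate_lists_spec : Claim_unchanged_build_candidate_lists := by
  intro coords k _ hD
  rcases lt_trichotomy k 0 with hneg | rfl | hpos
  · -- k < 0 outside D_: k ≤ 1 - n, every row of A is empty too
    have hkn : k ≤ 1 - (coords.length : Int) := by
      unfold D_build_candidate_lists at hD
      by_contra h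
      exact hD ⟨hneg, by omega⟩
    rw [A_eq_map, B_eq_map_nonpos coords k (by omega)]
    apply List.map_congr_left
    intro i hi
    exact pvRowA_neg_nil coords k i (List.mem_range.1 hi) hneg hkn
  · -- k = 0: both sides are all-empty rows
    rw [A_eq_map, B_eq_map_nonpos coords 0 le_rfl]
    apply List.map_congr_left
    intro i _
    unfold pvRowA
    rw [PySem.List.slice_to _ le_rfl]
    simp
  · -- k > 0: the main equivalence
    rw [A_eq_map, B_eq_map_pos coords k hpos]
    apply List.map_congr_left
    intro i _
    unfold pvRowA
    rw [PySem.List.slice_to _ (by omega)]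

theorem build_candidate_lists_changed : Claim_changed_build_candidate_lists := by
  unfold Claim_changed_build_candidate_lists; decide

theorem build_candidate_lists_tight : Claim_exact_build_candidate_lists := by
  intro coords k _ hD
  obtain ⟨hneg, hbig⟩ := hD
  have hn2 : 2 ≤ coords.length := by omega
  intro heq
  rw [A_eq_map, B_eq_map_nonpos coords k (by omega)] at heq
  have h0 := congrArg (fun l => l[0]?) heq
  simp only [List.getElem?_map] at h0
  have hr : (List.range coords.length)[0]? = some 0 := by
    rw [List.getElem?_range (by omega)]
  rw [hr] at h0
  simp only [Option.map_some] at h0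
  have hrow0 : pvRowA coords k ((0 : Nat) : Int) = [] := by
    simpa using h0
  have hlen : (pvRowA coords k ((0 : Nat) : Int)).length = 0 := by rw [hrow0]; rfl
  unfold pvRowA at hlen
  set srow := PySem.List.sorted (pvDrow coords ((0 : Nat) : Int)) (fun p => p.1) false with hs
  have hsl : srow.length = coords.length - 1 := by
    rw [hs, PySem.List.length_sorted, pvDrow_length coords 0 (by omega)]
  have hm : k = -(((-k).toNat : Nat) : Int) := by omega
  rw [hm, PySem.List.slice_to_neg_natCast srow (-k).toNat (by omega)] at hlen
  simp only [List.length_map, List.length_take] at hlen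
  omega
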